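-- pv_equiv track=rewrite | github.com/bmuralid/Pure-Fortran | xf2p.py | _rewrite_fortran_string_literals
-- ===== SOURCE A (Python) =====
-- def _fortran_unquote(s: str) -> str:
--     if len(s) >= 2 and s[0] == s[-1] and s[0] in ("'", "\""):
--         q = s[0]
--         return s[1:-1].replace(q + q, q)
--     return s
--
-- def _rewrite_fortran_string_literals(s: str) -> str:
--     out = []
--     i = 0
--     n = len(s)
--     while i < n:
--         ch = s[i]
--         if ch not in ("'", '"'):
--             out.append(ch)
--             i += 1
--             continue
--         q = ch
--         j = i + 1
--         while j < n:
--             if s[j] == q: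
--                 if j + 1 < n and s[j + 1] == q:
--                     j += 2
--                     continue
--                 lit = s[i:j + 1]
--                 out.append(repr(_fortran_unquote(lit)))
--                 i = j + 1
--                 break
--             j += 1
--         else:
--             out.append(ch)
--             i += 1
--     return ''.join(out)
-- ===== SOURCE B (Python) =====
-- def _rewrite_fortran_string_literals(s: str) -> str:
--     # Single-pass character state machine (outside / in-literal with raw buffer
--     # and a 'pending close' flag) instead of nested index scans; an unclosed
--     # literal at end of input restarts the machine on its buffered tail.
--     out = []
--     work = s
--     while True:
--         q = None          # current open quote, or None
--         buf = []          # raw chars seen inside the literal (doubled quotes kept)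
--         pending = False   # saw a quote char that may close the literal
--         for ch in work:
--             if q is None:
--                 if ch == "'" or ch == '"':
--                     q = ch
--                     buf = []
--                     pending = False
--                 else:
--                     out.append(ch)
--             elif ch == q:
--                 if pending:
--                     buf.append(q)
--                     buf.append(q)
--                     pending = False
--                 else:
--                     pending = True
--             elif pending:
--                 out.append(repr(''.join(buf).replace(q + q, q)))
--                 if ch == "'" or ch == '"':
--                     q = ch
--                     buf = []
--                     pending = False
--                 else:
--                     q = None
--                     out.append(ch)
--             else:
--                 buf.append(ch)
--         if q is None:
--             break
--         if pending:
--             out.append(repr(''.join(buf).replace(q + q, q)))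
--             break
--         # unclosed literal: emit the quote and rescan the buffered tail
--         out.append(q)
--         work = ''.join(buf)
--     return ''.join(out)
-- ===== Notes on version B (the rewrite author's own statement) =====
-- stated objective: alternative
-- what changed: Replaces A's nested index scans (outer while-i plus inner closing-quote search with slicing) by a single-pass character state machine carrying (open quote, raw buffer, pending-close flag), restarting on the buffered tail only when a literal is unclosed at end of input.
import Mathlib
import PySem

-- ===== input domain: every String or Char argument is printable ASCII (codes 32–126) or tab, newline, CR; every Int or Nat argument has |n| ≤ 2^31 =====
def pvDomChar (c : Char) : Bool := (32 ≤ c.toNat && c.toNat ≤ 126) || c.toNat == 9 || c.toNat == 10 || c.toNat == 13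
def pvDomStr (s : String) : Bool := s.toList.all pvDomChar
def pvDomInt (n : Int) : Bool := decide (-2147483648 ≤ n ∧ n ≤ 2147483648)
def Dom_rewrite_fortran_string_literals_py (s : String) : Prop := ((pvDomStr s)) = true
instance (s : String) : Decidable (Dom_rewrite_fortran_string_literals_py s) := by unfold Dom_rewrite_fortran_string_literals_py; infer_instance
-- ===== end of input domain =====

-- B replaces A's nested index scans by a single-pass character state machine,
-- restarting on the buffered tail when a literal is unclosed (objective: alternative; return value only).

-- shared ports of the Python BUILTINS both sources call:
-- str.replace(q+q, q): left-to-right, non-overlapping replacement of the doubled quote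
def replacePairs (q : Char) : List Char → List Char
  | [] => []
  | [c] => [c]
  | c :: c2 :: cs =>
      if c = q ∧ c2 = q then q :: replacePairs q cs
      else c :: replacePairs q (c2 :: cs)

-- repr(s), exact on the printable-ASCII + tab/newline/CR domain: quote choice and escapes
def reprEsc (q c : Char) : List Char :=
  if c = '\\' then ['\\', '\\']
  else if c = q then ['\\', q]
  else if c = '\t' then ['\\', 't']
  else if c = '\n' then ['\\', 'n']
  else if c = '\r' then ['\\', 'r']
  else [c]

def pyRepr (s : List Char) : List Char :=
  let q := if s.contains '\'' && !s.contains '"' then '"' else '\''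
  q :: s.flatMap (reprEsc q) ++ [q]

-- ===== PORT A =====
-- _fortran_unquote, literally
def fortranUnquote (s : List Char) : List Char :=
  if 2 ≤ s.length ∧ s.head? = s.getLast? ∧ (s.head? = some '\'' ∨ s.head? = some '"') then
    match s with
    | [] => []
    | _ :: cs => replacePairs (s.headD ' ') cs.dropLast
  else s

-- A's inner while-j loop: scan for the closing quote, skipping doubled quotes;
-- returns (chars strictly between the quotes, incl. the doubled ones, rest after the close)
def scanClose (q : Char) : List Char → Option (List Char × List Char)
  | [] => none
  | c :: cs =>
      if c = q then
        match cs with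
        | [] => some ([], [])
        | c2 :: cs2 =>
            if c2 = q then (scanClose q cs2).map (fun p => (q :: q :: p.1, p.2))
            else some ([], cs)
      else (scanClose q cs).map (fun p => (c :: p.1, p.2))

theorem scanClose_length_aux (q : Char) :
    ∀ (n : Nat) (l : List Char), l.length ≤ n → ∀ a r, scanClose q l = some (a, r) → r.length < l.length := by
  intro n
  induction n with
  | zero =>
      intro l hl a r h
      have : l = [] := List.length_eq_zero_iff.mp (Nat.le_antisymm hl (Nat.zero_le _))
      subst this
      simp [scanClose] at h
  | succ n ih =>
      intro l hl a r h
      rcases l with _ | ⟨c, cs⟩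
      · simp [scanClose] at h
      · rw [scanClose.eq_def] at h
        dsimp only [] at h
        by_cases hc : c = q
        · simp only [if_pos hc] at h
          rcases cs with _ | ⟨c2, cs2⟩
          · simp at h
            simp [← h.2]
          · by_cases h2 : c2 = q
            · simp only [if_pos h2, Option.map_eq_some_iff] at h
              obtain ⟨⟨a', r'⟩, hrec, hpair⟩ := h
              have := ih cs2 (by simp at hl ⊢; omega) a' r' hrec
              have hr : r' = r := by simpa using congrArg Prod.snd hpair
              subst hr
              simp at this ⊢
              omega
            · simp only [if_neg h2] at h
              have hr : c2 :: cs2 = r := by simpa using congrArg Prod.snd (Option.some_injective _ h)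
              subst hr; simp
        · simp only [if_neg hc, Option.map_eq_some_iff] at h
          obtain ⟨⟨a', r'⟩, hrec, hpair⟩ := h
          have := ih cs (by simp at hl ⊢; omega) a' r' hrec
          have hr : r' = r := by simpa using congrArg Prod.snd hpair
          subst hr
          simp at this ⊢
          omega

theorem scanClose_length {q : Char} {l a r : List Char} (h : scanClose q l = some (a, r)) :
    r.length < l.length :=
  scanClose_length_aux q l.length l le_rfl a r h

-- A's outer while-i loop
def goA : List Char → List Char
  | [] => []
  | c :: cs =>
      if c = '\'' ∨ c = '"' then
        match h : scanClose c cs with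
        | some (content, rest) =>
            pyRepr (fortranUnquote (c :: content ++ [c])) ++ goA rest
        | none => c :: goA cs
      else c :: goA cs
termination_by l => l.length
decreasing_by
  · exact Nat.lt_succ_of_lt (scanClose_length h)
  · simp
  · simp

def rewrite_fortran_string_literals_py (s : String) : String :=
  String.ofList (goA s.toList)

-- ===== PORT B =====
-- machine state: (emitted output, none = outside a literal
--                 | some (open quote, raw buffered literal chars, pending-close flag))
def stepB (st : List Char × Option (Char × List Char × Bool)) (ch : Char) :
    List Char × Option (Char × List Char × Bool) :=
  match st with
  | (out, none) =>
      if ch = '\'' ∨ ch = '"' then (out, some (ch, [], false)) else (out ++ [ch], none)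
  | (out, some (q, buf, pending)) =>
      if ch = q then
        if pending then (out, some (q, buf ++ [q, q], false))
        else (out, some (q, buf, true))
      else if pending then
        let out' := out ++ pyRepr (replacePairs q buf)
        if ch = '\'' ∨ ch = '"' then (out', some (ch, [], false))
        else (out' ++ [ch], none)
      else (out, some (q, buf ++ [ch], pending))

-- size of a machine mode: chars absorbed into the pending literal so far (for termination)
def modeSize : Option (Char × List Char × Bool) → Nat
  | none => 0
  | some (_, buf, p) => buf.length + (if p then 1 else 0) + 1

theorem stepB_modeSize (st : List Char × Option (Char × List Char × Bool)) (ch : Char) :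
    modeSize (stepB st ch).2 ≤ modeSize st.2 + 1 := by
  rcases st with ⟨out, _ | ⟨q, buf, p⟩⟩
  · simp only [stepB, modeSize]
    split_ifs <;> simp
  · cases p <;> simp only [stepB, modeSize] <;> split_ifs <;> simp

theorem foldl_stepB_modeSize (l : List Char) :
    ∀ st : List Char × Option (Char × List Char × Bool),
      modeSize (l.foldl stepB st).2 ≤ modeSize st.2 + l.length := by
  induction l with
  | nil => intro st; simp
  | cons c cs ih =>
      intro st
      simp only [List.foldl_cons, List.length_cons]
      have h1 := stepB_modeSize st c
      have h2 := ih (stepB st c)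
      omega

-- B's while-True loop: run the machine over the work string; on an unclosed
-- literal emit the quote and restart on the raw buffered tail
def goB (l : List Char) : List Char :=
  match h : l.foldl stepB ([], none) with
  | (out, none) => out
  | (out, some (q, buf, true)) => out ++ pyRepr (replacePairs q buf)
  | (out, some (q, buf, false)) => out ++ q :: goB buf
termination_by l.length
decreasing_by
  have := foldl_stepB_modeSize l ([], none)
  rw [h] at this
  simp [modeSize] at this
  omega

def rewrite_fortran_string_literals_py_alt (s : String) : String :=
  String.ofList (goB s.toList)

-- ===== PRECONDITION & SPEC =====
def Spec_rewrite_fortran_string_literals_py (s : String) (out : String) : Prop := out = rewrite_fortran_string_literals_py_alt s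
instance (s : String) (out : String) : Decidable (Spec_rewrite_fortran_string_literals_py s out) := by unfold Spec_rewrite_fortran_string_literals_py; infer_instance

-- ===== CLAIM (what is proved, stated in full; the proofs are below) =====
def Claim_equal_rewrite_fortran_string_literals_py : Prop := ∀ (s : String), Dom_rewrite_fortran_string_literals_py s → Spec_rewrite_fortran_string_literals_py s (rewrite_fortran_string_literals_py s)

-- ===== LEMMAS AND PROOFS =====

-- the machine only appends to its output component
theorem stepB_out (o : List Char) (m : Option (Char × List Char × Bool)) (ch : Char) :
    stepB (o, m) ch = (o ++ (stepB ([], m) ch).1, (stepB ([], m) ch).2) := by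
  rcases m with _ | ⟨q, buf, p⟩ <;> simp only [stepB] <;> split_ifs <;> simp

theorem foldl_stepB_out (l : List Char) :
    ∀ (o : List Char) (m : Option (Char × List Char × Bool)),
      l.foldl stepB (o, m) = (o ++ (l.foldl stepB ([], m)).1, (l.foldl stepB ([], m)).2) := by
  induction l with
  | nil => intro o m; simp
  | cons c cs ih =>
      intro o m
      simp only [List.foldl_cons]
      rw [stepB_out o m c, ih (o ++ (stepB ([], m) c).1) (stepB ([], m) c).2]
      rcases h : stepB ([], m) c with ⟨a, m'⟩
      rw [ih a m']
      simp

-- running the machine inside a literal agrees with A's closing-quote scan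
theorem foldl_stepB_inlit :
    ∀ (n : Nat) (l : List Char), l.length ≤ n → ∀ (q : Char) (out buf : List Char),
      l.foldl stepB (out, some (q, buf, false)) =
        match scanClose q l with
        | none => (out, some (q, buf ++ l, false))
        | some (content, []) => (out, some (q, buf ++ content, true))
        | some (content, r :: rs) =>
            (r :: rs).foldl stepB (out ++ pyRepr (replacePairs q (buf ++ content)), none) := by
  intro n
  induction n with
  | zero =>
      intro l hl q out buf
      have : l = [] := List.length_eq_zero_iff.mp (Nat.le_antisymm hl (Nat.zero_le _))
      subst this
      simp [scanClose]
  | succ n ih =>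
      intro l hl q out buf
      rcases l with _ | ⟨c, cs⟩
      · simp [scanClose]
      · by_cases hc : c = q
        · subst hc
          rcases cs with _ | ⟨c2, cs2⟩
          · simp [scanClose, stepB]
          · by_cases h2 : c2 = c
            · subst h2
              have hsc : scanClose c2 (c2 :: c2 :: cs2)
                  = (scanClose c2 cs2).map (fun p => (c2 :: c2 :: p.1, p.2)) := by
                rw [scanClose.eq_def]; simp
              rw [hsc]
              have hstep : (c2 :: c2 :: cs2).foldl stepB (out, some (c2, buf, false))
                  = cs2.foldl stepB (out, some (c2, buf ++ [c2, c2], false)) := by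
                simp [List.foldl_cons, stepB]
              rw [hstep, ih cs2 (by simp at hl; omega) c2 out (buf ++ [c2, c2])]
              rcases hs : scanClose c2 cs2 with _ | ⟨a, _ | ⟨r, rs⟩⟩ <;> simp
            · have hsc : scanClose c (c :: c2 :: cs2) = some ([], c2 :: cs2) := by
                rw [scanClose.eq_def]; simp [h2]
              rw [hsc]
              have hstep : (c :: c2 :: cs2).foldl stepB (out, some (c, buf, false))
                  = cs2.foldl stepB (stepB (out ++ pyRepr (replacePairs c buf), none) c2) := by
                simp only [List.foldl_cons]
                congr 1
                simp [stepB, h2]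
              rw [hstep]
              simp [List.foldl_cons]
        · have hsc : scanClose q (c :: cs) = (scanClose q cs).map (fun p => (c :: p.1, p.2)) := by
            rw [scanClose.eq_def]; simp [hc]
          rw [hsc]
          have hstep : (c :: cs).foldl stepB (out, some (q, buf, false))
              = cs.foldl stepB (out, some (q, buf ++ [c], false)) := by
            simp [List.foldl_cons, stepB, hc]
          rw [hstep, ih cs (by simp at hl; omega) q out (buf ++ [c])]
          rcases hs : scanClose q cs with _ | ⟨a, _ | ⟨r, rs⟩⟩ <;> simp

-- unfolding equations for goB, one per final machine mode
theorem goB_none {l o : List Char} (h : l.foldl stepB ([], none) = (o, none)) : goB l = o := by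
  rw [goB.eq_def]
  split <;> rename_i heq <;> rw [h] at heq <;> injection heq with h1 h2
  · exact h1.symm
  all_goals exact absurd h2.symm (by simp)

theorem goB_true {l o b : List Char} {q : Char}
    (h : l.foldl stepB ([], none) = (o, some (q, b, true))) :
    goB l = o ++ pyRepr (replacePairs q b) := by
  rw [goB.eq_def]
  split <;> rename_i heq <;> rw [h] at heq <;> injection heq with h1 h2
  · exact absurd h2.symm (by simp)
  · obtain ⟨rfl, rfl, -⟩ := by simpa using h2.symm
    rw [h1]
  · simp at h2

theorem goB_false {l o b : List Char} {q : Char}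
    (h : l.foldl stepB ([], none) = (o, some (q, b, false))) :
    goB l = o ++ q :: goB b := by
  rw [goB.eq_def]
  split <;> rename_i heq <;> rw [h] at heq <;> injection heq with h1 h2
  · exact absurd h2.symm (by simp)
  · simp at h2
  · obtain ⟨rfl, rfl, -⟩ := by simpa using h2.symm
    rw [h1]

-- a common output prefix factors out of goB
theorem goB_shift {l l' pre : List Char}
    (h : l.foldl stepB ([], none)
        = (pre ++ (l'.foldl stepB ([], none)).1, (l'.foldl stepB ([], none)).2)) :
    goB l = pre ++ goB l' := by
  rcases hX : l'.foldl stepB ([], none) with ⟨o, _ | ⟨q, b, p⟩⟩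
  · rw [hX] at h
    rw [goB_none h, goB_none hX]
  · rw [hX] at h
    cases p
    · rw [goB_false h, goB_false hX]
      simp
    · rw [goB_true h, goB_true hX]
      simp

-- _fortran_unquote applied to a well-formed literal collapses to the doubled-quote replacement
theorem fortranUnquote_lit (q : Char) (hq : q = '\'' ∨ q = '"') (content : List Char) :
    fortranUnquote (q :: content ++ [q]) = replacePairs q content := by
  have hlast : (q :: content ++ [q]).getLast? = some q := by
    simp [List.getLast?_cons]
  have hcond : 2 ≤ (q :: content ++ [q]).length ∧
      (q :: content ++ [q]).head? = (q :: content ++ [q]).getLast? ∧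
      ((q :: content ++ [q]).head? = some '\'' ∨ (q :: content ++ [q]).head? = some '"') := by
    refine ⟨by simp, by rw [hlast]; simp, ?_⟩
    rcases hq with h | h <;> simp [h]
  unfold fortranUnquote
  rw [if_pos hcond]
  simp


theorem goA_eq_goB_aux : ∀ (n : Nat) (l : List Char), l.length ≤ n → goA l = goB l := by
  intro n
  induction n with
  | zero =>
      intro l hl
      have : l = [] := List.length_eq_zero_iff.mp (Nat.le_antisymm hl (Nat.zero_le _))
      subst this
      rw [goB_none (o := []) rfl]
      simp [goA]
  | succ n ih =>
      intro l hl
      rcases l with _ | ⟨c, cs⟩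
      · rw [goB_none (o := []) rfl]
        simp [goA]
      · by_cases hq : c = '\'' ∨ c = '"'
        · have hfold : (c :: cs).foldl stepB ([], none)
              = cs.foldl stepB ([], some (c, [], false)) := by
            simp [List.foldl_cons, stepB, hq]
          rw [goA.eq_def]
          dsimp only []
          rw [if_pos hq]
          have hin := foldl_stepB_inlit cs.length cs le_rfl c [] []
          split
          · next content rest heq =>
              rw [heq] at hin
              rcases rest with _ | ⟨r, rs⟩
              · have : (c :: cs).foldl stepB ([], none) = ([], some (c, content, true)) := by
                  rw [hfold, hin]; simp
                rw [goB_true this, fortranUnquote_lit c hq content]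
                simp [goA]
              · have hrw : (c :: cs).foldl stepB ([], none)
                    = (r :: rs).foldl stepB (pyRepr (replacePairs c content), none) := by
                  rw [hfold, hin]; simp
                have hshift : (c :: cs).foldl stepB ([], none)
                    = (pyRepr (replacePairs c content) ++ ((r :: rs).foldl stepB ([], none)).1,
                       ((r :: rs).foldl stepB ([], none)).2) := by
                  rw [hrw, foldl_stepB_out]
                rw [goB_shift hshift, fortranUnquote_lit c hq content]
                rw [ih (r :: rs) (by have hlt := scanClose_length heq; simp only [List.length_cons] at hlt hl ⊢; omega)]
          · next heq =>
              rw [heq] at hin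
              have : (c :: cs).foldl stepB ([], none) = ([], some (c, cs, false)) := by
                rw [hfold, hin]; simp
              rw [goB_false this]
              rw [ih cs (by simp at hl; omega)]
              simp
        · rw [goA.eq_def]
          dsimp only []
          rw [if_neg hq]
          have hfold : (c :: cs).foldl stepB ([], none) = cs.foldl stepB ([c], none) := by
            simp [List.foldl_cons, stepB, hq]
          have hshift : (c :: cs).foldl stepB ([], none)
              = ([c] ++ (cs.foldl stepB ([], none)).1, (cs.foldl stepB ([], none)).2) := by
            rw [hfold, foldl_stepB_out]
          rw [goB_shift hshift, ih cs (by simp at hl; omega)]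
          simp

theorem goA_eq_goB (l : List Char) : goA l = goB l :=
  goA_eq_goB_aux l.length l le_rfl

-- ===== VERDICT (by name: the statement is the Claim_ definition above) =====
theorem rewrite_fortran_string_literals_py_spec : Claim_equal_rewrite_fortran_string_literals_py := by
  intro s _
  unfold Spec_rewrite_fortran_string_literals_py rewrite_fortran_string_literals_py rewrite_fortran_string_literals_py_alt
  rw [goA_eq_goB]
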